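-- pv_equiv track=rewrite | github.com/YAN-PEIYI/wehelpmission | week-2/Assignment_week-2.py | maxZeros
-- ===== SOURCE A (Python) =====
-- def maxZeros(nums):
--
--     n = len(nums)
--     count = 0
--     result2 = 0
--
--     for i in range(0, n): #造訪list中所有的位置
--
--         if nums[i] == 1:
--             count = 0
--
--         else:
--             count+= 1
--             result2 = max(result2, count)
--
--     print (result2)
--     return result2
-- ===== SOURCE B (Python) =====
-- def maxZeros(nums):
--     # Divide at each 1: the answer is the max length of the segments between 1s.
--     def longest(rest):
--         if 1 not in rest:
--             return len(rest)
--         i = rest.index(1)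
--         return max(i, longest(rest[i + 1:]))
--     result2 = longest(nums)
--     print(result2)
--     return result2
-- ===== Notes on version B (the rewrite author's own statement) =====
-- stated objective: faster
-- what changed: Replaces the per-element running-counter scan with a divide-at-first-1 recursion: the answer is the maximum length of the segments between 1s, located with list.index and sliced off, so the scanning runs in C instead of a Python-level loop body per element.
import Mathlib
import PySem

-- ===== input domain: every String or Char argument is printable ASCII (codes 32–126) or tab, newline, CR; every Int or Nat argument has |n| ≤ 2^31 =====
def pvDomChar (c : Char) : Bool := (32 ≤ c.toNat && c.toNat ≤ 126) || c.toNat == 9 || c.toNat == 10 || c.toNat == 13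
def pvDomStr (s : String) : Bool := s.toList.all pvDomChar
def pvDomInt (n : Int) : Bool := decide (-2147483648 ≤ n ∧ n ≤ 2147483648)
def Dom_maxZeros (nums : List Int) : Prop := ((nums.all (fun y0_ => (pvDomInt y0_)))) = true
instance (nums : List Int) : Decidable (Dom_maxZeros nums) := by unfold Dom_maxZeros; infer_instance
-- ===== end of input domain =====

-- B replaces the running-counter scan with a divide-at-first-1 recursion (max segment length
-- between 1s); same return value, and both versions print the result before returning it
-- (the equivalence proved here is about the return value).

-- ===== PORT A =====
-- running-counter scan over indices; pyGetD's default is never used (indices are in range)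
def maxZeros (nums : List Int) : Int :=
  let n : Int := nums.length
  let st := (PySem.List.pyRange 0 n 1).foldl
    (fun (st : Int × Int) i =>
      if PySem.List.pyGetD nums i 0 == 1 then (0, st.2)
      else (st.1 + 1, max st.2 (st.1 + 1)))
    (0, 0)
  st.2

-- ===== PORT B =====
def longestRun (rest : List Int) : Int :=
  match h : PySem.List.index? rest 1 with
  | none => (rest.length : Int)
  | some i => max (i : Int) (longestRun (rest.drop (i + 1)))
termination_by rest.length
decreasing_by
  obtain ⟨hk, -⟩ := PySem.List.getElem_of_index?_eq_some h
  simp [List.length_drop]; omega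

def maxZeros_alt (nums : List Int) : Int := longestRun nums

-- ===== PRECONDITION & SPEC =====
def Spec_maxZeros (nums : List Int) (out : Int) : Prop := out = maxZeros_alt nums
instance (nums : List Int) (out : Int) : Decidable (Spec_maxZeros nums out) := by unfold Spec_maxZeros; infer_instance

-- ===== CLAIM (what is proved, stated in full; the proofs are below) =====
def Claim_equal_maxZeros : Prop := ∀ (nums : List Int), Dom_maxZeros nums → Spec_maxZeros nums (maxZeros nums)

-- ===== LEMMAS AND PROOFS =====

def gStep (st : Int × Int) (x : Int) : Int × Int :=
  if x == 1 then (0, st.2) else (st.1 + 1, max st.2 (st.1 + 1))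

lemma foldl_gStep_snd_max (nums : List Int) : ∀ (c r : Int), 0 ≤ c → 0 ≤ r →
    (nums.foldl gStep (c, r)).2 = max r (nums.foldl gStep (c, 0)).2 := by
  induction nums with
  | nil => intro c r _ hr; simp; omega
  | cons x t ih =>
    intro c r hc hr
    by_cases hx : x = 1
    · subst hx
      simp only [List.foldl_cons, gStep, beq_self_eq_true, if_true]
      exact ih 0 r le_rfl hr
    · simp only [List.foldl_cons, gStep, beq_iff_eq, if_neg hx]
      rw [ih (c + 1) (max r (c + 1)) (by omega) (by omega),
          ih (c + 1) (max 0 (c + 1)) (by omega) (by omega)]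
      omega

lemma foldl_gStep_onefree (pre : List Int) : ∀ (c r : Int), (∀ x ∈ pre, x ≠ 1) → 0 ≤ c →
    pre.foldl gStep (c, r) = (c + pre.length, if pre = [] then r else max r (c + pre.length)) := by
  induction pre with
  | nil => intro c r _ _; simp
  | cons x t ih =>
    intro c r hfree hc
    have hx : x ≠ 1 := hfree x (by simp)
    simp only [List.foldl_cons, gStep, beq_iff_eq, if_neg hx]
    rw [ih (c + 1) (max r (c + 1)) (fun y hy => hfree y (by simp [hy])) (by omega)]
    rcases eq_or_ne t [] with rfl | ht
    · simp
    · simp only [if_neg ht, List.length_cons, if_neg (List.cons_ne_nil x t), Prod.mk.injEq]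
      have : (0 : Int) ≤ t.length := by positivity
      push_cast
      constructor <;> omega

lemma foldl_gStep_eq_longestRun (nums : List Int) :
    (nums.foldl gStep (0, 0)).2 = longestRun nums := by
  induction hn : nums.length using Nat.strong_induction_on generalizing nums with
  | _ n ih =>
  subst hn
  rw [longestRun]
  split
  · rename_i hnone
    have hfree : ∀ x ∈ nums, x ≠ 1 := by
      intro x hx hx1
      have h1 : (1 : Int) ∈ nums := by rwa [hx1] at hx
      rw [← PySem.List.index?_isSome_iff, hnone] at h1
      simp at h1
    rw [foldl_gStep_onefree nums 0 0 hfree le_rfl]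
    rcases eq_or_ne nums [] with rfl | h
    · simp
    · simp only [if_neg h]
      have : (0 : Int) ≤ nums.length := by positivity
      omega
  · rename_i i hsome
    obtain ⟨pre, suf, heq, hlen, hnotmem⟩ := (PySem.List.index?_eq_some_iff nums 1 i).mp hsome
    subst heq
    have hfree : ∀ x ∈ pre, x ≠ 1 := fun x hx hx1 => hnotmem (by rwa [hx1] at hx)
    have hdrop : (pre ++ 1 :: suf).drop (i + 1) = suf := by
      subst hlen
      have hsplit : pre ++ 1 :: suf = (pre ++ [1]) ++ suf := by simp
      rw [hsplit, show pre.length + 1 = (pre ++ [1]).length by simp, List.drop_left]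
    rw [List.foldl_append, foldl_gStep_onefree pre 0 0 hfree le_rfl]
    have hpre2 : (((0 : Int) + pre.length, if pre = [] then (0:Int) else max 0 (0 + pre.length)) : Int × Int)
        = ((pre.length : Int), (pre.length : Int)) := by
      rcases eq_or_ne pre [] with rfl | h
      · simp
      · simp only [if_neg h, Prod.mk.injEq]
        have : (0 : Int) ≤ pre.length := by positivity
        constructor <;> omega
    rw [hpre2]
    simp only [List.foldl_cons, gStep]
    rw [if_pos (show ((1 : Int) == 1) = true by decide)]
    rw [foldl_gStep_snd_max suf 0 (pre.length : Int) le_rfl (by positivity)]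
    rw [ih suf.length (by simp; omega) suf rfl, hdrop, hlen]

-- ===== VERDICT (by name: the statement is the Claim_ definition above) =====
theorem maxZeros_spec : Claim_equal_maxZeros := by
  intro nums _
  show maxZeros nums = maxZeros_alt nums
  unfold maxZeros maxZeros_alt
  show (List.foldl (fun st i => gStep st (PySem.List.pyGetD nums i 0)) ((0:Int), (0:Int))
      (PySem.List.pyRange 0 (nums.length : Int))).2 = longestRun nums
  rw [PySem.List.foldl_pyRange_zero_pyGetD' nums 0 gStep ((0:Int), (0:Int))]
  exact foldl_gStep_eq_longestRun nums
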